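-- pv_equiv track=rewrite | github.com/qkre/Problem-Solve | PJH/programmers/135808.py | solution
-- ===== SOURCE A (Python) =====
-- def solution(k, m, score):
--     answer = 0
--     score.sort(reverse=True)
--     index = -1
--     while index + m < len(score):
--         index += m
--         answer += score[index] * m
--
--     return answer
-- ===== SOURCE B (Python) =====
-- def solution(k, m, score):
--     # Group-min sum without sorting the whole list: count occurrences of each
--     # value, then walk the DISTINCT values from largest to smallest, tracking
--     # how many elements have been consumed; each time the running count passes
--     # a multiple of m a group of m is completed and its cheapest fruit is the
--     # current value.
--     freq = {}
--     for s in score: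
--         freq[s] = freq.get(s, 0) + 1
--     total = 0
--     seen = 0
--     for v in sorted(freq, reverse=True):
--         c = freq[v]
--         total += v * m * ((seen + c) // m - seen // m)
--         seen += c
--     return total
-- ===== Notes on version B (the rewrite author's own statement) =====
-- stated objective: alternative
-- what changed: A sorts the whole list descending and walks every m-th position with a while loop; B never sorts the list: it builds a frequency dictionary, walks only the distinct values in descending order with a running count, and adds v*m for every multiple of m the running count crosses inside a value's run.
import Mathlib
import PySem

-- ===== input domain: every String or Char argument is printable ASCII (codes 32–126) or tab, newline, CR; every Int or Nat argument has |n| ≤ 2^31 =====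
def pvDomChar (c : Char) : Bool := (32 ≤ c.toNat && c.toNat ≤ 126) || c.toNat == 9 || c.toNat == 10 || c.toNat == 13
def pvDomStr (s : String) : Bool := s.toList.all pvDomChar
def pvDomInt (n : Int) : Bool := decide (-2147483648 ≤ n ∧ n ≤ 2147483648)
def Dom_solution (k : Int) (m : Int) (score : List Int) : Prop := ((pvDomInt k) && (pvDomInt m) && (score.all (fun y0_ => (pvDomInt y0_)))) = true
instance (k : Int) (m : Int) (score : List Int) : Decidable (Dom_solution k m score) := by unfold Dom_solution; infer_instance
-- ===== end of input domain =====

-- B replaces A's full descending sort + walk over every m-th position by a frequency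
-- dictionary and a single walk over the DISTINCT values in descending order with a running
-- count, adding v*m for every multiple of m the count crosses inside a value's run.
-- NOTE: A sorts `score` in place (an observable mutation); B does not — the equivalence
-- proved here is about the RETURN value only.

-- ===== PORT A =====
-- fuel-bounded transliteration of A's while loop (the fuel only makes it total; under
-- Pre_solution the loop runs at most `score.length` times, so the fuel is never exhausted)
def solLoopA (s : List Int) (m : Int) : Nat → Int → Int → Int
  | 0, _, ans => ans
  | fuel+1, idx, ans =>
    if idx + m < (s.length : Int) then
      match PySem.List.pyGet? s (idx + m) with
      | some v => solLoopA s m fuel (idx + m) (ans + v * m)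
      | none => ans   -- IndexError: Python raises here; excluded by Pre_solution
    else ans

def solution (k : Int) (m : Int) (score : List Int) : Int :=
  solLoopA (PySem.List.sorted score (fun x => x) true) m
    ((PySem.List.sorted score (fun x => x) true).length + 1) (-1) 0

-- ===== PORT B =====
-- freq = {}; for s in score: freq[s] = freq.get(s, 0) + 1
def bFreq (score : List Int) : PySem.Dict Int Int :=
  score.foldl (fun d s => d.insert s (d.getD s 0 + 1)) PySem.Dict.empty

-- total/seen accumulator pair over sorted(freq, reverse=True)
-- (m = 0 would be a ZeroDivisionError in Python; excluded by Pre_solution)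
def solution_alt (k : Int) (m : Int) (score : List Int) : Int :=
  ((PySem.List.sorted (bFreq score).keys (fun x => x) true).foldl
    (fun st v =>
      (st.1 + v * m * (PySem.Int.floordiv (st.2 + (bFreq score).getD v 0) m
                       - PySem.Int.floordiv st.2 m),
       st.2 + (bFreq score).getD v 0))
    (0, 0)).1

-- ===== PRECONDITION & SPEC =====
-- Pre_ excludes only m <= 0, where A never returns: it raises IndexError (m < 0, or m = 0
-- with empty score) or loops forever (m = 0 with non-empty score); B would raise
-- ZeroDivisionError at m = 0.
def Pre_solution (k : Int) (m : Int) (score : List Int) : Prop := 1 <= m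
instance (k : Int) (m : Int) (score : List Int) : Decidable (Pre_solution k m score) := by unfold Pre_solution; infer_instance
def pvWitness_solution : Int × Int × List Int := (1, 2, [3, 1, 2])

def Spec_solution (k : Int) (m : Int) (score : List Int) (out : Int) : Prop := out = solution_alt k m score
instance (k : Int) (m : Int) (score : List Int) (out : Int) : Decidable (Spec_solution k m score out) := by unfold Spec_solution; infer_instance

-- ===== CLAIM (what is proved, stated in full; the proofs are below) =====
def Claim_equal_solution : Prop := ∀ (k : Int) (m : Int) (score : List Int), Dom_solution k m score → Pre_solution k m score → Spec_solution k m score (solution k m score)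

-- ===== LEMMAS AND PROOFS =====

-- ---- A-side: the while loop is m * (sum of the elements at positions m-1, 2m-1, …) ----

lemma pyRange_nil_of_ge {a b s : Int} (hs : 0 < s) (hab : b ≤ a) :
    PySem.List.pyRange a b s = [] := by
  rw [PySem.List.pyRange_of_pos _ _ hs]
  have h2 : ¬ (a < b) := by omega
  simp [h2]

lemma pyRange_cons_pos {a b s : Int} (hs : 0 < s) (hab : a < b) :
    PySem.List.pyRange a b s = a :: PySem.List.pyRange (a + s) b s := by
  rw [PySem.List.pyRange_of_pos _ _ hs, PySem.List.pyRange_of_pos _ _ hs]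
  simp only [hab, if_true]
  by_cases h2 : a + s < b
  · simp only [h2, if_true]
    have hc : ((b - a + s - 1) / s).toNat = ((b - (a+s) + s - 1) / s).toNat + 1 := by
      have : b - a + s - 1 = (b - (a+s) + s - 1) + 1 * s := by ring
      rw [this, Int.add_mul_ediv_right _ _ (by omega : s ≠ 0)]
      have hnn : 0 ≤ (b - (a+s) + s - 1) / s := by
        apply Int.ediv_nonneg <;> omega
      omega
    rw [hc, List.range_succ_eq_map]
    simp [List.map_map, Function.comp]
    intro j _
    ring
  · simp only [h2, if_false]
    have hc : ((b - a + s - 1) / s).toNat = 1 := by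
      have h3 : (b - a + s - 1) / s = 1 := by
        have e : b - a + s - 1 = (b - a - 1) + 1 * s := by ring
        rw [e, Int.add_mul_ediv_right _ _ (by omega : s ≠ 0),
          Int.ediv_eq_zero_of_lt (by omega) (by omega)]
        omega
      omega
    simp [hc, List.range_succ]

lemma solLoopA_eq (d : List Int) (m : Int) (hm : 1 ≤ m) :
    ∀ (fuel : Nat) (idx ans : Int), 0 ≤ idx + m →
      (d.length : Int) ≤ idx + m + fuel * m →
      solLoopA d m fuel idx ans =
        ans + m * ((PySem.List.pyRange (idx + m) (d.length : Int) m).map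
          (fun i => (PySem.List.pyGet? d i).getD 0)).sum := by
  intro fuel
  induction fuel with
  | zero =>
    intro idx ans h0 hf
    rw [pyRange_nil_of_ge (by omega) (by simpa using hf)]
    simp [solLoopA]
  | succ n ih =>
    intro idx ans h0 hf
    by_cases hlt : idx + m < (d.length : Int)
    · have hget : PySem.List.pyGet? d (idx + m) = some (d[(idx+m).toNat]'(by omega)) := by
        exact PySem.List.pyGet?_eq_some_getElem _ h0 hlt
      rw [pyRange_cons_pos (by omega) hlt]
      simp only [solLoopA, hlt, if_true, hget, List.map_cons, List.sum_cons]
      have : idx + m + m = (idx + m) + m := by ring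
      rw [ih (idx + m) _ (by omega) (by
        have e : ((n:Int) + 1) * m = (n:Int) * m + m := by ring
        push_cast at hf
        omega)]
      simp only [Option.getD_some]
      ring
    · simp only [solLoopA, hlt, if_false]
      rw [pyRange_nil_of_ge (by omega) (by omega)]
      simp

lemma count_A (n M : Nat) (hM : 0 < M) :
    (if -1 + (M:Int) < (n:Int) then (((n:Int) - (-1 + (M:Int)) + (M:Int) - 1) / (M:Int)).toNat else 0) = n / M := by
  by_cases h : -1 + (M:Int) < (n:Int)
  · simp only [h, if_true]
    have e : (n:Int) - (-1 + (M:Int)) + (M:Int) - 1 = (n:Int) := by ring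
    rw [e, ← Int.natCast_div]
    exact Int.toNat_natCast _
  · simp only [h, if_false]
    have hnM : n < M := by omega
    exact (Nat.div_eq_of_lt hnM).symm

-- ---- the common yardstick: sum of d[i] over the positions i with M ∣ i+1 (offset pre) ----

def groupS (M : Nat) (pre : Nat) (d : List Int) : Int :=
  ∑ i ∈ Finset.range d.length, if M ∣ pre + i + 1 then d.getD i 0 else 0

lemma groupS_append (M pre : Nat) (xs ys : List Int) :
    groupS M pre (xs ++ ys) = groupS M pre xs + groupS M (pre + xs.length) ys := by
  unfold groupS
  rw [List.length_append, Finset.sum_range_add]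
  congr 1
  · apply Finset.sum_congr rfl
    intro i hi
    rw [Finset.mem_range] at hi
    rw [List.getD_append _ _ _ _ hi]
  · apply Finset.sum_congr rfl
    intro i _
    rw [List.getD_append_right _ _ _ _ (by omega)]
    have e1 : pre + (xs.length + i) + 1 = pre + xs.length + i + 1 := by omega
    have e2 : xs.length + i - xs.length = i := by omega
    rw [e1, e2]

lemma card_multiples (M : Nat) (hM : 0 < M) (pre c : Nat) :
    ((Finset.range c).filter (fun i => M ∣ pre + i + 1)).card = (pre + c) / M - pre / M := by
  induction c with
  | zero => simp
  | succ n ih =>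
    rw [Finset.range_add_one, Finset.filter_insert]
    have hmono : pre / M ≤ (pre + n) / M := Nat.div_le_div_right (by omega)
    have hs : (pre + (n+1)) / M = (pre + n) / M + if M ∣ pre + n + 1 then 1 else 0 := by
      have : pre + (n + 1) = (pre + n) + 1 := by omega
      rw [this, Nat.succ_div]
    by_cases hd : M ∣ pre + n + 1
    · rw [if_pos hd, Finset.card_insert_of_notMem (by simp), ih]
      simp only [hs, hd, if_true]
      omega
    · rw [if_neg hd, ih]
      simp only [hs, hd, if_false]
      omega

lemma groupS_replicate (M : Nat) (hM : 0 < M) (pre c : Nat) (v : Int) :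
    groupS M pre (List.replicate c v) = v * (((pre + c) / M - pre / M : Nat) : Int) := by
  unfold groupS
  rw [List.length_replicate]
  have he : ∀ i ∈ Finset.range c,
      (if M ∣ pre + i + 1 then (List.replicate c v).getD i 0 else 0)
      = v * (if M ∣ pre + i + 1 then 1 else 0) := by
    intro i hi
    rw [Finset.mem_range] at hi
    rw [List.getD_eq_getElem?_getD, List.getElem?_replicate, if_pos hi]
    split_ifs <;> simp
  rw [Finset.sum_congr rfl he, ← Finset.mul_sum, Finset.sum_boole, ← card_multiples M hM pre c]

-- ---- B-side: the fold over the distinct descending values computes groupS of the flattened runs ----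

lemma b_fold_eq (M : Nat) (hM : 0 < M) (cnt : Int → Nat) :
    ∀ (ks : List Int) (t0 : Int) (pre : Nat),
      (ks.foldl
        (fun st v =>
          (st.1 + v * (M:Int) * (PySem.Int.floordiv (st.2 + ((cnt v : Nat) : Int)) (M:Int)
                                 - PySem.Int.floordiv st.2 (M:Int)),
           st.2 + ((cnt v : Nat) : Int)))
        (t0, (pre : Int))).1
      = t0 + (M:Int) * groupS M pre (ks.flatMap (fun v => List.replicate (cnt v) v)) := by
  intro ks
  induction ks with
  | nil => intro t0 pre; simp [groupS]
  | cons v ks ih =>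
    intro t0 pre
    simp only [List.foldl_cons, List.flatMap_cons]
    have hcast : (pre : Int) + ((cnt v : Nat) : Int) = ((pre + cnt v : Nat) : Int) := by push_cast; ring
    rw [hcast, PySem.Int.floordiv_natCast, PySem.Int.floordiv_natCast, ih]
    rw [groupS_append, groupS_replicate M hM, List.length_replicate]
    have hmono : pre / M ≤ (pre + cnt v) / M := Nat.div_le_div_right (by omega)
    push_cast [hmono]
    ring

-- ---- the strided positions m-1, 2m-1, … are exactly the positions i with M ∣ i+1 ----

lemma strided_eq_groupS (M : Nat) (hM : 0 < M) (d : List Int) :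
    ∑ j ∈ Finset.range (d.length / M), d.getD (M - 1 + M * j) 0 = groupS M 0 d := by
  unfold groupS
  simp only [Nat.zero_add]
  rw [← Finset.sum_filter]
  refine Finset.sum_nbij' (fun j => M - 1 + M * j) (fun i => (i + 1) / M - 1) ?_ ?_ ?_ ?_ ?_
  · intro j hj
    rw [Finset.mem_range] at hj
    simp only [Finset.mem_filter, Finset.mem_range]
    have h3 : M * (j + 1) = M * j + M := by ring
    constructor
    · have h1 : M * (j + 1) ≤ M * (d.length / M) := Nat.mul_le_mul_left _ (by omega)
      have h2 := Nat.mul_div_le d.length M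
      omega
    · exact ⟨j + 1, by omega⟩
  · intro i hi
    simp only [Finset.mem_filter, Finset.mem_range] at hi
    obtain ⟨hin, q, hq⟩ := hi
    rw [Finset.mem_range]
    have hq1 : 1 ≤ q := by nlinarith
    have h1 : (i + 1) / M = q := by rw [hq]; exact Nat.mul_div_cancel_left q hM
    have h2 : q ≤ d.length / M := (Nat.le_div_iff_mul_le hM).mpr (by rw [Nat.mul_comm]; omega)
    show (i + 1) / M - 1 < d.length / M
    omega
  · intro j hj
    rw [Finset.mem_range] at hj
    show (M - 1 + M * j + 1) / M - 1 = j
    have h1 : (M - 1 + M * j + 1) = M * (j + 1) := by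
      have h3 : M * (j + 1) = M * j + M := by ring
      omega
    rw [h1, Nat.mul_div_cancel_left _ hM]
    omega
  · intro i hi
    simp only [Finset.mem_filter, Finset.mem_range] at hi
    obtain ⟨hin, q, hq⟩ := hi
    have hq1 : 1 ≤ q := by nlinarith
    have h1 : (i + 1) / M = q := by rw [hq]; exact Nat.mul_div_cancel_left q hM
    show M - 1 + M * ((i + 1) / M - 1) = i
    rw [h1]
    have h3 : M * (q - 1) + M = M * q := by
      have : M * q = M * (q - 1) + M * 1 := by rw [← Nat.mul_add]; congr 1; omega
      omega
    omega
  · intro j _; rfl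

-- ---- the descending-sorted list is the flattening of the runs of the distinct values ----

lemma count_flatMap_replicate (cnt : Int → Nat) (x : Int) :
    ∀ (ks : List Int), ks.Nodup →
      (ks.flatMap (fun v => List.replicate (cnt v) v)).count x = if x ∈ ks then cnt x else 0 := by
  intro ks
  induction ks with
  | nil => simp
  | cons v ks ih =>
    intro hnd
    rw [List.nodup_cons] at hnd
    rw [List.flatMap_cons, List.count_append, ih hnd.2, List.count_replicate]
    by_cases hx : x = v
    · subst hx
      simp [hnd.1]
    · simp [hx, Ne.symm hx]

lemma perm_flatMap_replicate (score ks : List Int) (hnd : ks.Nodup)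
    (hmem : ∀ x, x ∈ ks ↔ x ∈ score) :
    score.Perm (ks.flatMap (fun v => List.replicate (score.count v) v)) := by
  rw [List.perm_iff_count]
  intro x
  rw [count_flatMap_replicate _ x ks hnd]
  by_cases hx : x ∈ ks
  · simp [hx]
  · have : x ∉ score := fun h => hx ((hmem x).mpr h)
    simp [hx, List.count_eq_zero_of_not_mem this]

lemma pairwise_flatMap_replicate (cnt : Int → Nat) :
    ∀ (ks : List Int), ks.Pairwise (· < ·) →
      (ks.flatMap (fun v => List.replicate (cnt v) v)).Pairwise (· ≤ ·) := by
  intro ks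
  induction ks with
  | nil => simp
  | cons v ks ih =>
    intro hp
    rw [List.pairwise_cons] at hp
    rw [List.flatMap_cons, List.pairwise_append]
    refine ⟨List.pairwise_replicate.mpr (Or.inr le_rfl), ih hp.2, ?_⟩
    intro a ha b hb
    rw [List.eq_of_mem_replicate ha]
    obtain ⟨u, hu, hbu⟩ := List.mem_flatMap.mp hb
    rw [List.eq_of_mem_replicate hbu]
    exact le_of_lt (hp.1 u hu)

lemma flat_asc (score : List Int) :
    PySem.List.sorted score (fun x => x) false
    = (PySem.List.sorted (PySem.Set.ofList score) (fun x => x) false).flatMap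
        (fun v => List.replicate (score.count v) v) := by
  set ks := PySem.List.sorted (PySem.Set.ofList score) (fun x => x) false with hks
  have hknd : ks.Nodup := ((PySem.List.sorted_perm _ _ _).nodup_iff).mpr (PySem.Set.nodup_ofList score)
  have hkmem : ∀ x, x ∈ ks ↔ x ∈ score := by
    intro x
    rw [(PySem.List.sorted_perm _ _ _).mem_iff, PySem.Set.mem_ofList]
  have hklt : ks.Pairwise (· < ·) := by
    have h1 : ks.Pairwise (· ≤ ·) := PySem.List.sorted_pairwise _ _
    have h2 : ks.Pairwise (· ≠ ·) := hknd
    exact (h1.and h2).imp (fun h => lt_of_le_of_ne h.1 h.2)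
  apply PySem.List.eq_of_perm_of_pairwise_le_of_injective (fun x => x) (fun a b h => h)
  · exact (PySem.List.sorted_perm _ _ _).trans
      (perm_flatMap_replicate score ks hknd hkmem)
  · exact PySem.List.sorted_pairwise _ _
  · exact pairwise_flatMap_replicate _ ks hklt

lemma sorted_desc_eq_reverse (xs : List Int) :
    PySem.List.sorted xs (fun x => x) true = (PySem.List.sorted xs (fun x => x) false).reverse := by
  have h := PySem.List.eq_of_perm_of_pairwise_le_of_injective (l₁ := (PySem.List.sorted xs (fun x => x) true).reverse)
    (l₂ := PySem.List.sorted xs (fun x => x) false) (fun x => x) (fun a b h => h)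
    ((PySem.List.sorted xs (fun x => x) true).reverse_perm.trans
      ((PySem.List.sorted_perm xs (fun x => x) true).trans (PySem.List.sorted_perm xs (fun x => x) false).symm))
    (List.pairwise_reverse.mpr (PySem.List.sorted_pairwise_rev xs (fun x => x)))
    (PySem.List.sorted_pairwise xs (fun x => x))
  have := congrArg List.reverse h
  simpa using this

lemma flat_desc (score : List Int) :
    PySem.List.sorted score (fun x => x) true
    = (PySem.List.sorted (PySem.Set.ofList score) (fun x => x) true).flatMap
        (fun v => List.replicate (score.count v) v) := by
  rw [sorted_desc_eq_reverse score, sorted_desc_eq_reverse (PySem.Set.ofList score),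
    flat_asc, List.reverse_flatMap]
  exact List.flatMap_congr (fun x _ => List.reverse_replicate)

-- ---- main assembly ----

lemma main_eq (k m : Int) (score : List Int) (hm : 1 ≤ m) :
    solution k m score = solution_alt k m score := by
  obtain ⟨M, rfl⟩ : ∃ M : Nat, (M:Int) = m := ⟨m.toNat, Int.toNat_of_nonneg (by omega)⟩
  have hM : 0 < M := by exact_mod_cast hm
  -- B side: the fold over the distinct values is M * groupS of the flattened runs
  have hfreq : bFreq score = PySem.Dict.counter score :=
    PySem.Dict.foldl_insert_getD_add_one_eq_counter score
  have hB := b_fold_eq M hM (fun v => score.count v)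
    (PySem.List.sorted (PySem.Set.ofList score) (fun x => x) true) 0 0
  rw [Nat.cast_zero] at hB
  simp only [solution_alt, hfreq, PySem.Dict.keys_counter, PySem.Dict.getD_counter]
  rw [hB, ← flat_desc score]
  -- A side: the while loop is M * (sum over the strided positions)
  simp only [solution]
  set dd := PySem.List.sorted score (fun x => x) true with hdd
  have hfuel : (dd.length : Int) ≤ -1 + (M:Int) + ((dd.length + 1 : Nat) : Int) * (M:Int) := by
    have h1 : ((dd.length + 1 : Nat) : Int) * 1 ≤ ((dd.length + 1 : Nat) : Int) * (M:Int) :=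
      mul_le_mul_of_nonneg_left hm (by positivity)
    omega
  rw [solLoopA_eq dd (M:Int) hm _ _ _ (by omega) hfuel]
  rw [PySem.List.pyRange_of_pos _ _ (by exact_mod_cast hM : (0:Int) < (M:Int)),
    count_A dd.length M hM, List.map_map]
  show 0 + (M:Int) * (∑ j ∈ Finset.range (dd.length / M),
      ((fun i => (PySem.List.pyGet? dd i).getD 0) ∘ fun j : Nat => -1 + (M:Int) + (M:Int) * (j:Int)) j)
    = 0 + (M:Int) * groupS M 0 dd
  rw [← strided_eq_groupS M hM dd]
  congr 1
  apply congrArg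
  apply Finset.sum_congr rfl
  intro j _
  have hc : -1 + (M:Int) + (M:Int) * (j:Int) = ((M - 1 + M * j : Nat) : Int) := by
    push_cast [Nat.cast_sub (by omega : 1 ≤ M)]
    ring
  simp only [Function.comp, hc, PySem.List.pyGet?_natCast]
  rw [← List.getD_eq_getElem?_getD]

-- ===== VERDICT (by name: the statement is the Claim_ definition above) =====
theorem solution_spec : Claim_equal_solution := by
  intro k m score _ hpre
  unfold Pre_solution at hpre
  unfold Spec_solution
  exact main_eq k m score hpre
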